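-- pv_equiv track=rewrite | github.com/aneetaraju-bot/Monthly-Review-Trend | streamlit_app.py | kpi_guess_options
-- ===== SOURCE A (Python) =====
-- def kpi_guess_options(all_metrics):
--     key_map = {
--         "AVERAGE of Course completion %": ["completion"],
--         "AVERAGE of NPS": ["nps"],
--         "SUM of No of Placements(Monthly)": ["placement", "placements"],
--         "AVERAGE of Reg to Placement %": ["reg to placement"],
--         "AVERAGE of Active Student %": ["active student"],
--         "AVERAGE of Avg Mentor Rating": ["mentor", "rating"],
--     }
--     preselect = {}
--     for k, needles in key_map.items():
--         picks = [m for m in all_metrics if any(n in m.lower() for n in needles)]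
--         preselect[k] = picks
--     return preselect
-- ===== SOURCE B (Python) =====
-- # Table-free straight-line classification: one pass, six named accumulators,
-- # direct substring tests (no key_map, no any()); the needle "placements" is
-- # dropped because any string containing "placements" contains "placement".
-- def kpi_guess_options(all_metrics):
--     completion = []
--     nps = []
--     placements = []
--     reg = []
--     active = []
--     mentor = []
--     for m in all_metrics:
--         ml = m.lower()
--         if "completion" in ml:
--             completion.append(m)
--         if "nps" in ml:
--             nps.append(m)
--         if "placement" in ml:
--             placements.append(m)
--         if "reg to placement" in ml:
--             reg.append(m)
--         if "active student" in ml: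
--             active.append(m)
--         if "mentor" in ml or "rating" in ml:
--             mentor.append(m)
--     return {
--         "AVERAGE of Course completion %": completion,
--         "AVERAGE of NPS": nps,
--         "SUM of No of Placements(Monthly)": placements,
--         "AVERAGE of Reg to Placement %": reg,
--         "AVERAGE of Active Student %": active,
--         "AVERAGE of Avg Mentor Rating": mentor,
--     }
-- ===== Notes on version B (the rewrite author's own statement) =====
-- stated objective: faster
-- what changed: Replaced A's table-driven construction (a key_map dict with per-key needle lists, a filter of all_metrics per key with an inner any() scan) by table-free straight-line code: one pass over all_metrics with six named accumulators and direct substring conditionals, lowercasing each metric once, and the redundant needle 'placements' eliminated since it is subsumed by 'placement'.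
import Mathlib
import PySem

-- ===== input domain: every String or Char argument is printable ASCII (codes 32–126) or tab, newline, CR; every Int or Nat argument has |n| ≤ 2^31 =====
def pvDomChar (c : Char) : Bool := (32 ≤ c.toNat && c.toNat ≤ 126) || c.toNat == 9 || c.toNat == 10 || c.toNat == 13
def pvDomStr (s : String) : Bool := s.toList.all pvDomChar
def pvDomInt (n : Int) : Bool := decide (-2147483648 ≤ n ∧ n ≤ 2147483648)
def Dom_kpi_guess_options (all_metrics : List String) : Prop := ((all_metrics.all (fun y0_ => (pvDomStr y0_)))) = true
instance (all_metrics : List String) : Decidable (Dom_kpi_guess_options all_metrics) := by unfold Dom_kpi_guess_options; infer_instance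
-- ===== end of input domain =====

-- B replaces A's table-driven per-key filtering (key_map dict + inner any() over needle lists)
-- by table-free straight-line code: one pass, six named accumulators, direct substring tests,
-- with the needle "placements" dropped as subsumed by "placement" (objective: faster; measured).

-- ===== PORT A =====
-- A's literal key_map dict (distinct string keys, insertion order) as an association list
def pvKeyMapA : List (String × List String) :=
  [("AVERAGE of Course completion %", ["completion"]),
   ("AVERAGE of NPS", ["nps"]),
   ("SUM of No of Placements(Monthly)", ["placement", "placements"]),
   ("AVERAGE of Reg to Placement %", ["reg to placement"]),
   ("AVERAGE of Active Student %", ["active student"]),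
   ("AVERAGE of Avg Mentor Rating", ["mentor", "rating"])]

-- A: for each key of key_map, filter all_metrics by its needles; preselect[k] = picks with k a
-- fresh key appends the pair (dict insertion order; exact since the six keys are distinct).
def kpi_guess_options (all_metrics : List String) : List (String × List String) :=
  pvKeyMapA.foldl
    (fun preselect kn =>
      preselect ++ [(kn.1, all_metrics.filter
        (fun m => kn.2.any (fun n => PySem.Str.isIn n (PySem.Str.lower m))))])
    []

-- ===== PORT B =====
-- B: one pass over all_metrics carrying the six buckets as a tuple, lowercase once per metric,
-- straight-line conditionals; the result dict is assembled at the end.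
def kpi_guess_options_alt (all_metrics : List String) : List (String × List String) :=
  let st := all_metrics.foldl
    (fun st m =>
      let ml := PySem.Str.lower m
      match st with
      | (completion, nps, placements, reg, active, mentor) =>
        let completion := if PySem.Str.isIn "completion" ml then completion ++ [m] else completion
        let nps := if PySem.Str.isIn "nps" ml then nps ++ [m] else nps
        let placements := if PySem.Str.isIn "placement" ml then placements ++ [m] else placements
        let reg := if PySem.Str.isIn "reg to placement" ml then reg ++ [m] else reg
        let active := if PySem.Str.isIn "active student" ml then active ++ [m] else active
        let mentor := if PySem.Str.isIn "mentor" ml || PySem.Str.isIn "rating" ml then mentor ++ [m] else mentor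
        (completion, nps, placements, reg, active, mentor))
    (([] : List String), ([] : List String), ([] : List String),
     ([] : List String), ([] : List String), ([] : List String))
  match st with
  | (completion, nps, placements, reg, active, mentor) =>
    [("AVERAGE of Course completion %", completion),
     ("AVERAGE of NPS", nps),
     ("SUM of No of Placements(Monthly)", placements),
     ("AVERAGE of Reg to Placement %", reg),
     ("AVERAGE of Active Student %", active),
     ("AVERAGE of Avg Mentor Rating", mentor)]

-- ===== PRECONDITION & SPEC =====
def Spec_kpi_guess_options (all_metrics : List String) (out : List (String × List String)) : Prop := out = kpi_guess_options_alt all_metrics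
instance (all_metrics : List String) (out : List (String × List String)) : Decidable (Spec_kpi_guess_options all_metrics out) := by unfold Spec_kpi_guess_options; infer_instance

-- ===== CLAIM =====
def Claim_equal_kpi_guess_options : Prop := ∀ (all_metrics : List String), Dom_kpi_guess_options all_metrics → Spec_kpi_guess_options all_metrics (kpi_guess_options all_metrics)

-- ===== LEMMAS AND PROOFS =====
set_option maxHeartbeats 1000000

-- B's loop body, named for the proofs (definitionally the lambda inside kpi_guess_options_alt)
def pvStepB (st : List String × List String × List String × List String × List String × List String)
    (m : String) : List String × List String × List String × List String × List String × List String :=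
  let ml := PySem.Str.lower m
  match st with
  | (completion, nps, placements, reg, active, mentor) =>
    let completion := if PySem.Str.isIn "completion" ml then completion ++ [m] else completion
    let nps := if PySem.Str.isIn "nps" ml then nps ++ [m] else nps
    let placements := if PySem.Str.isIn "placement" ml then placements ++ [m] else placements
    let reg := if PySem.Str.isIn "reg to placement" ml then reg ++ [m] else reg
    let active := if PySem.Str.isIn "active student" ml then active ++ [m] else active
    let mentor := if PySem.Str.isIn "mentor" ml || PySem.Str.isIn "rating" ml then mentor ++ [m] else mentor
    (completion, nps, placements, reg, active, mentor)

-- a metric containing "placements" contains "placement" (infix transitivity)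
lemma placements_subsumed (ml : String) :
    (PySem.Str.isIn "placement" ml || PySem.Str.isIn "placements" ml) = PySem.Str.isIn "placement" ml := by
  cases h : PySem.Str.isIn "placements" ml
  · simp
  · have h2 : PySem.Str.isIn "placement" ml = true := by
      rw [PySem.Str.isIn_iff_infix] at h ⊢
      exact List.IsInfix.trans (by decide) h
    simp only [h2, Bool.or_true]

-- B's loop, from arbitrary bucket contents, appends to each bucket the metrics its test filters
lemma alt_loop (ms : List String) (b1 b2 b3 b4 b5 b6 : List String) :
    ms.foldl pvStepB (b1, b2, b3, b4, b5, b6)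
    = (b1 ++ ms.filter (fun m => PySem.Str.isIn "completion" (PySem.Str.lower m)),
       b2 ++ ms.filter (fun m => PySem.Str.isIn "nps" (PySem.Str.lower m)),
       b3 ++ ms.filter (fun m => PySem.Str.isIn "placement" (PySem.Str.lower m)),
       b4 ++ ms.filter (fun m => PySem.Str.isIn "reg to placement" (PySem.Str.lower m)),
       b5 ++ ms.filter (fun m => PySem.Str.isIn "active student" (PySem.Str.lower m)),
       b6 ++ ms.filter (fun m => PySem.Str.isIn "mentor" (PySem.Str.lower m) || PySem.Str.isIn "rating" (PySem.Str.lower m))) := by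
  induction ms generalizing b1 b2 b3 b4 b5 b6 with
  | nil => simp
  | cons m t ih =>
    rw [List.foldl_cons, show pvStepB (b1, b2, b3, b4, b5, b6) m =
        ((if PySem.Str.isIn "completion" (PySem.Str.lower m) then b1 ++ [m] else b1),
         (if PySem.Str.isIn "nps" (PySem.Str.lower m) then b2 ++ [m] else b2),
         (if PySem.Str.isIn "placement" (PySem.Str.lower m) then b3 ++ [m] else b3),
         (if PySem.Str.isIn "reg to placement" (PySem.Str.lower m) then b4 ++ [m] else b4),
         (if PySem.Str.isIn "active student" (PySem.Str.lower m) then b5 ++ [m] else b5),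
         (if PySem.Str.isIn "mentor" (PySem.Str.lower m) || PySem.Str.isIn "rating" (PySem.Str.lower m) then b6 ++ [m] else b6)) from rfl,
      ih]
    simp only [List.filter_cons, Prod.mk.injEq]
    refine ⟨?_, ?_, ?_, ?_, ?_, ?_⟩ <;> (split_ifs <;> simp)

-- ===== VERDICT =====
theorem kpi_guess_options_spec : Claim_equal_kpi_guess_options := by
  intro all_metrics _
  unfold Spec_kpi_guess_options kpi_guess_options kpi_guess_options_alt
  rw [show (fun (st : List String × List String × List String × List String × List String × List String) (m : String) =>
        let ml := PySem.Str.lower m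
        match st with
        | (completion, nps, placements, reg, active, mentor) =>
          let completion := if PySem.Str.isIn "completion" ml then completion ++ [m] else completion
          let nps := if PySem.Str.isIn "nps" ml then nps ++ [m] else nps
          let placements := if PySem.Str.isIn "placement" ml then placements ++ [m] else placements
          let reg := if PySem.Str.isIn "reg to placement" ml then reg ++ [m] else reg
          let active := if PySem.Str.isIn "active student" ml then active ++ [m] else active
          let mentor := if PySem.Str.isIn "mentor" ml || PySem.Str.isIn "rating" ml then mentor ++ [m] else mentor
          (completion, nps, placements, reg, active, mentor)) = pvStepB from rfl,
    alt_loop]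
  simp only [pvKeyMapA, List.foldl_cons, List.foldl_nil, List.nil_append, List.append_assoc]
  simp only [List.any_cons, List.any_nil, Bool.or_false]
  rw [List.filter_congr (fun m _ => placements_subsumed (PySem.Str.lower m))]
  simp
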